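-- pv_equiv track=rewrite | github.com/mvccc/zanmei | hymns/hymn_md.py | md_to_lyrics
-- ===== SOURCE A (Python) =====
-- def _strip_md_linebreak(line: str) -> str:
--     if not line.strip():
--         return ""
--     if line.endswith("  "):
--         return line[:-2]
--     return line.rstrip()
--
-- def md_to_lyrics(md_content: str) -> tuple[str, list[tuple[str, list[str]]]]:
--     """Returns: (hymn_title, [(verse_marker, [lyric_lines]), ...])"""
--     lines = md_content.strip().split("\n")
--
--     hymn_title = ""
--     slides = []
--     current_verse = ""
--     current_lyrics = []
--
--     for line in lines:
--         if line.startswith("# "):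
--             hymn_title = line[2:].strip()
--         elif line.startswith("## "):
--             if current_lyrics:
--                 slides.append((current_verse, current_lyrics))
--             current_verse = line[3:].strip()
--             current_lyrics = []
--         elif line.startswith("##"):
--             if current_lyrics:
--                 slides.append((current_verse, current_lyrics))
--             current_verse = ""
--             current_lyrics = []
--         elif line.strip():
--             current_lyrics.append(_strip_md_linebreak(line))
--
--     if current_lyrics:
--         slides.append((current_verse, current_lyrics))
--
--     return hymn_title, slides
-- ===== SOURCE B (Python) =====
-- def _strip_md_linebreak(line: str) -> str:
--     if not line.strip():
--         return ""
--     if line.endswith("  "):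
--         return line[:-2]
--     return line.rstrip()
--
--
-- def _is_header(line: str) -> bool:
--     return line.startswith("##")
--
--
-- def _lyric_of(line: str):
--     if line.startswith("# ") or not line.strip():
--         return None
--     return _strip_md_linebreak(line)
--
--
-- def _blocks(lines: list, verse: str) -> list:
--     """Recursively split lines into (verse, lyrics) slides, back-to-front."""
--     i = 0
--     while i < len(lines) and not _is_header(lines[i]):
--         i += 1
--     lyrics = [x for x in (_lyric_of(l) for l in lines[:i]) if x is not None]
--     if i == len(lines):
--         rest = []
--     else:
--         header = lines[i]
--         next_verse = header[3:].strip() if header.startswith("## ") else ""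
--         rest = _blocks(lines[i + 1:], next_verse)
--     return ([(verse, lyrics)] if lyrics else []) + rest
--
--
-- def md_to_lyrics(md_content: str) -> tuple[str, list[tuple[str, list[str]]]]:
--     """Returns: (hymn_title, [(verse_marker, [lyric_lines]), ...])"""
--     lines = md_content.strip().split("\n")
--     title = next((l[2:].strip() for l in reversed(lines) if l.startswith("# ")), "")
--     return title, _blocks(lines, "")
-- ===== Notes on version B (the rewrite author's own statement) =====
-- stated objective: alternative
-- what changed: A's single pass carrying four mutable state variables (title, slides, current verse, current lyrics) is replaced by a separate reverse scan for the last title heading plus a recursive partition of the remaining lines into verse-header blocks, each block's lyric list built by filtering its slice.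
import Mathlib
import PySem

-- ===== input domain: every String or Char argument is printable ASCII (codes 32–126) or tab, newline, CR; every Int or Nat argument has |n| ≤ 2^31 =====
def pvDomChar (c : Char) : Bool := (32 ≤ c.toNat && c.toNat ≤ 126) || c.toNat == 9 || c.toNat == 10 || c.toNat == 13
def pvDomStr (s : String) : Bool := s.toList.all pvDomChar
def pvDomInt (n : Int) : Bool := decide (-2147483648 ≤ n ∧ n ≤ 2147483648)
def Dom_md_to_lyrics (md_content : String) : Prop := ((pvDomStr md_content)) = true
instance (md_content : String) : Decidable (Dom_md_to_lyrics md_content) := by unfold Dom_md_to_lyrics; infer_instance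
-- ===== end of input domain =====

-- B re-decomposes A's single 4-state fold into a separate title scan plus a recursive
-- header-partition of the lines (objective: alternative decomposition, same cost).

-- shared helper (_strip_md_linebreak, identical in Source A and Source B)
def pvStripMdLinebreak (line : String) : String :=
  if PySem.Str.strip line = "" then ""
  else if PySem.Str.endswith line "  " then PySem.Str.slice line none (some (-2))
  else PySem.Str.rstrip line

-- ===== PORT A =====
def pvStepA (st : String × List (String × List String) × String × List String)
    (line : String) : String × List (String × List String) × String × List String :=
  match st with
  | (title, slides, verse, lyrics) =>
    if PySem.Str.startswith line "# " then
      (PySem.Str.strip (PySem.Str.slice line (some 2) none), slides, verse, lyrics)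
    else if PySem.Str.startswith line "## " then
      (title, (if lyrics = [] then slides else slides ++ [(verse, lyrics)]),
       PySem.Str.strip (PySem.Str.slice line (some 3) none), [])
    else if PySem.Str.startswith line "##" then
      (title, (if lyrics = [] then slides else slides ++ [(verse, lyrics)]), "", [])
    else if PySem.Str.strip line ≠ "" then
      (title, slides, verse, lyrics ++ [pvStripMdLinebreak line])
    else (title, slides, verse, lyrics)

def md_to_lyrics (md_content : String) : String × (List (String × List String)) :=
  let lines := (PySem.Str.split? (PySem.Str.strip md_content) "\n").getD []
  match lines.foldl pvStepA ("", [], "", []) with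
  | (title, slides, verse, lyrics) =>
    (title, if lyrics = [] then slides else slides ++ [(verse, lyrics)])

-- ===== PORT B =====
def pvIsHeader (line : String) : Bool := PySem.Str.startswith line "##"

def pvLyricOf (line : String) : Option String :=
  if PySem.Str.startswith line "# " || PySem.Str.strip line == "" then none
  else some (pvStripMdLinebreak line)

def pvBlocks (lines : List String) (verse : String) : List (String × List String) :=
  let lyrics := (lines.takeWhile (fun l => !pvIsHeader l)).filterMap pvLyricOf
  let head := if lyrics = [] then [] else [(verse, lyrics)]
  match h : lines.dropWhile (fun l => !pvIsHeader l) with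
  | [] => head
  | hdr :: tl =>
      head ++ pvBlocks tl
        (if PySem.Str.startswith hdr "## " then
          PySem.Str.strip (PySem.Str.slice hdr (some 3) none) else "")
termination_by lines.length
decreasing_by
  have h2 := congrArg List.length h
  have h3 := List.length_dropWhile_le (fun l => !pvIsHeader l) lines
  simp at h2
  omega

def md_to_lyrics_alt (md_content : String) : String × (List (String × List String)) :=
  let lines := (PySem.Str.split? (PySem.Str.strip md_content) "\n").getD []
  let title :=
    match lines.reverse.find? (fun l => PySem.Str.startswith l "# ") with
    | some l => PySem.Str.strip (PySem.Str.slice l (some 2) none)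
    | none => ""
  (title, pvBlocks lines "")

-- ===== PRECONDITION & SPEC =====
def Spec_md_to_lyrics (md_content : String) (out : String × (List (String × List String))) : Prop := out = md_to_lyrics_alt md_content
instance (md_content : String) (out : String × (List (String × List String))) : Decidable (Spec_md_to_lyrics md_content out) := by unfold Spec_md_to_lyrics; infer_instance

-- ===== CLAIM (what is proved, stated in full; the proofs are below) =====
def Claim_equal_md_to_lyrics : Prop := ∀ (md_content : String), Dom_md_to_lyrics md_content → Spec_md_to_lyrics md_content (md_to_lyrics md_content)

-- ===== LEMMAS AND PROOFS =====

-- Proof-only generalisation of A's slide accumulation: pending verse/lyrics carried explicitly.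
def pvG (verse : String) (ly : List String) : List String → List (String × List String)
  | [] => if ly = [] then [] else [(verse, ly)]
  | l :: rest =>
    if PySem.Str.startswith l "# " then pvG verse ly rest
    else if PySem.Str.startswith l "## " then
      (if ly = [] then [] else [(verse, ly)]) ++
        pvG (PySem.Str.strip (PySem.Str.slice l (some 3) none)) [] rest
    else if PySem.Str.startswith l "##" then
      (if ly = [] then [] else [(verse, ly)]) ++ pvG "" [] rest
    else if PySem.Str.strip l ≠ "" then pvG verse (ly ++ [pvStripMdLinebreak l]) rest
    else pvG verse ly rest

theorem pv_hash_excl (l : String) (h : PySem.Str.startswith l "##" = true) :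
    PySem.Str.startswith l "# " = false := by
  simp only [PySem.Str.startswith_eq] at *
  rw [PySem.Chars.startswith_iff] at h
  obtain ⟨t, ht⟩ := h
  rw [Bool.eq_false_iff]
  intro hc
  rw [PySem.Chars.startswith_iff] at hc
  have he : ("##".toList : List Char) = ['#', '#'] := rfl
  rw [he] at ht
  rw [← ht] at hc
  simp [List.cons_prefix_cons] at hc

theorem pv_space_hash (l : String) (h : PySem.Str.startswith l "## " = true) :
    PySem.Str.startswith l "##" = true := by
  simp only [PySem.Str.startswith_eq] at *
  rw [PySem.Chars.startswith_iff] at *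
  exact List.IsPrefix.trans (by decide) h

theorem pv_stepA_fst (st : String × List (String × List String) × String × List String)
    (x : String) :
    (pvStepA st x).1 =
      if PySem.Str.startswith x "# " then
        PySem.Str.strip (PySem.Str.slice x (some 2) none) else st.1 := by
  obtain ⟨t, s, v, ly⟩ := st
  simp only [pvStepA]
  split_ifs <;> rfl

theorem pv_title_fold (lines : List String)
    (st : String × List (String × List String) × String × List String) :
    (lines.foldl pvStepA st).1 =
      (match lines.reverse.find? (fun l => PySem.Str.startswith l "# ") with
       | some l => PySem.Str.strip (PySem.Str.slice l (some 2) none)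
       | none => st.1) := by
  induction lines generalizing st with
  | nil => rfl
  | cons x xs ih =>
    simp only [List.foldl_cons, List.reverse_cons, List.find?_append]
    rw [ih]
    cases hf : xs.reverse.find? (fun l => PySem.Str.startswith l "# ") with
    | some l => simp
    | none =>
      simp only [Option.none_or]
      rw [pv_stepA_fst]
      simp only [List.find?, PySem.Str.startswith_eq]
      by_cases hb : PySem.Chars.startswith x.toList ['#', ' '] = true
      · simp [hb]
      · rw [Bool.not_eq_true] at hb
        simp [hb]

theorem pv_slides_fold (lines : List String)
    (t : String) (s : List (String × List String)) (v : String) (ly : List String) :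
    (if (lines.foldl pvStepA (t, s, v, ly)).2.2.2 = []
     then (lines.foldl pvStepA (t, s, v, ly)).2.1
     else (lines.foldl pvStepA (t, s, v, ly)).2.1 ++
        [((lines.foldl pvStepA (t, s, v, ly)).2.2.1,
          (lines.foldl pvStepA (t, s, v, ly)).2.2.2)]) =
      s ++ pvG v ly lines := by
  induction lines generalizing t s v ly with
  | nil =>
    simp only [List.foldl_nil, pvG]
    split_ifs <;> simp
  | cons x xs ih =>
    simp only [List.foldl_cons]
    by_cases h1 : PySem.Str.startswith x "# "
    · rw [show pvStepA (t, s, v, ly) x =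
          (PySem.Str.strip (PySem.Str.slice x (some 2) none), s, v, ly) by
            simp only [pvStepA]; rw [if_pos h1]]
      rw [ih, pvG, if_pos h1]
    · by_cases h2 : PySem.Str.startswith x "## "
      · rw [show pvStepA (t, s, v, ly) x =
            (t, (if ly = [] then s else s ++ [(v, ly)]),
             PySem.Str.strip (PySem.Str.slice x (some 3) none), []) by
              simp only [pvStepA]; rw [if_neg h1, if_pos h2]]
        rw [ih, pvG, if_neg h1, if_pos h2]
        split_ifs <;> simp
      · by_cases h3 : PySem.Str.startswith x "##"
        · rw [show pvStepA (t, s, v, ly) x =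
              (t, (if ly = [] then s else s ++ [(v, ly)]), "", []) by
                simp only [pvStepA]; rw [if_neg h1, if_neg h2, if_pos h3]]
          rw [ih, pvG, if_neg h1, if_neg h2, if_pos h3]
          split_ifs <;> simp
        · by_cases h4 : PySem.Str.strip x ≠ ""
          · rw [show pvStepA (t, s, v, ly) x =
                (t, s, v, ly ++ [pvStripMdLinebreak x]) by
                  simp only [pvStepA]; rw [if_neg h1, if_neg h2, if_neg h3, if_pos h4]]
            rw [ih, pvG, if_neg h1, if_neg h2, if_neg h3, if_pos h4]
          · rw [show pvStepA (t, s, v, ly) x = (t, s, v, ly) by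
                  simp only [pvStepA]; rw [if_neg h1, if_neg h2, if_neg h3, if_neg h4]]
            rw [ih, pvG, if_neg h1, if_neg h2, if_neg h3, if_neg h4]

theorem pvG_split (lines : List String) (v : String) (ly : List String) :
    pvG v ly lines =
      (if ly ++ (lines.takeWhile (fun l => !pvIsHeader l)).filterMap pvLyricOf = []
       then []
       else [(v, ly ++ (lines.takeWhile (fun l => !pvIsHeader l)).filterMap pvLyricOf)]) ++
      (match lines.dropWhile (fun l => !pvIsHeader l) with
       | [] => []
       | hdr :: tl =>
          pvG (if PySem.Str.startswith hdr "## " then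
                PySem.Str.strip (PySem.Str.slice hdr (some 3) none) else "") [] tl) := by
  induction lines generalizing ly with
  | nil => simp [pvG]
  | cons x xs ih =>
    by_cases hH : pvIsHeader x
    · have hx1 : PySem.Str.startswith x "# " = false := pv_hash_excl x hH
      rw [show (x :: xs).takeWhile (fun l => !pvIsHeader l) = [] by
            simp [List.takeWhile, hH],
          show (x :: xs).dropWhile (fun l => !pvIsHeader l) = x :: xs by
            simp [List.dropWhile, hH]]
      rw [pvG, if_neg (by simpa using hx1)]
      by_cases h2 : PySem.Str.startswith x "## "
      · have h2' : PySem.Chars.startswith x.toList ['#', '#', ' '] = true := by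
          simpa using h2
        rw [if_pos h2]
        simp [h2']
      · have h3 : PySem.Str.startswith x "##" = true := hH
        have h2' : PySem.Chars.startswith x.toList ['#', '#', ' '] = false := by
          simpa using h2
        rw [if_neg h2, if_pos h3]
        simp [h2']
    · have hT : (x :: xs).takeWhile (fun l => !pvIsHeader l)
          = x :: xs.takeWhile (fun l => !pvIsHeader l) := by simp [List.takeWhile, hH]
      have hD : (x :: xs).dropWhile (fun l => !pvIsHeader l)
          = xs.dropWhile (fun l => !pvIsHeader l) := by simp [List.dropWhile, hH]
      have h3 : PySem.Str.startswith x "##" = false := by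
        rw [Bool.eq_false_iff]; intro hc; exact hH (by simpa [pvIsHeader] using hc)
      have h2 : PySem.Str.startswith x "## " = false := by
        rw [Bool.eq_false_iff]; intro hc
        rw [pv_space_hash x hc] at h3; exact absurd h3 (by simp)
      rw [hT, hD]
      by_cases h1 : PySem.Str.startswith x "# "
      · have h1' : PySem.Chars.startswith x.toList ['#', ' '] = true := by simpa using h1
        have hly : pvLyricOf x = none := by simp [pvLyricOf, h1']
        rw [pvG, if_pos h1, ih ly]
        simp [hly]
      · have h1' : PySem.Chars.startswith x.toList ['#', ' '] = false := by simpa using h1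
        by_cases h4 : PySem.Str.strip x = ""
        · have hly : pvLyricOf x = none := by simp [pvLyricOf, h4]
          rw [pvG, if_neg h1, if_neg (by simpa using h2), if_neg (by simpa using h3),
            if_neg (by simp [h4]), ih ly]
          simp [hly]
        · have hly : pvLyricOf x = some (pvStripMdLinebreak x) := by
            simp [pvLyricOf, h1', h4]
          rw [pvG, if_neg h1, if_neg (by simpa using h2), if_neg (by simpa using h3),
            if_pos h4, ih (ly ++ [pvStripMdLinebreak x])]
          simp [hly]

theorem pv_blocks_eq_G (lines : List String) (v : String) :
    pvBlocks lines v = pvG v [] lines := by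
  rw [pvBlocks, pvG_split lines v []]
  simp only [List.nil_append]
  cases h : lines.dropWhile (fun l => !pvIsHeader l) with
  | nil => simp
  | cons hdr tl => simp [pv_blocks_eq_G tl]
termination_by lines.length
decreasing_by
  have h2 := congrArg List.length h
  have h3 := List.length_dropWhile_le (fun l => !pvIsHeader l) lines
  simp at h2
  omega

-- ===== VERDICT (by name: the statement is the Claim_ definition above) =====
theorem md_to_lyrics_spec : Claim_equal_md_to_lyrics := by
  intro md _
  show md_to_lyrics md = md_to_lyrics_alt md
  unfold md_to_lyrics md_to_lyrics_alt
  simp only []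
  generalize (PySem.Str.split? (PySem.Str.strip md) "\n").getD [] = L
  have h1 := pv_title_fold L ("", [], "", [])
  have h2 := pv_slides_fold L "" [] "" []
  rcases hst : L.foldl pvStepA ("", [], "", []) with ⟨t, s2, v, ly⟩
  rw [hst] at h1 h2
  simp only at h1 h2
  rw [pv_blocks_eq_G L ""]
  exact Prod.ext h1 (by simpa using h2)
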